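-- pv_equiv track=rewrite | github.com/sahuvivek083/INFYTQ-LEVEL-2-SOLUTIONS | problem44_L2.py | check_correct_depth
-- ===== SOURCE A (Python) =====
-- def check_correct_depth(input_list, depth=0):
--     count = 0
--     status = ""
--
--     for i in input_list:
--         if i == "(":
--             count += 1
--
--         if i == ")":
--             count -= 1
--
--         if i.isdigit():
--             if count == int(i):
--                 status += "True"
--
--             else:
--                 status += "False"
--                 break
--
--     if "False" not in status:
--         return True
--
--     else:
--         return False
-- ===== SOURCE B (Python) =====
-- def check_correct_depth(input_list, depth=0):
--     # Phase 1: build a depth table (inclusive prefix sums of per-element deltas).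
--     deltas = [1 if x == "(" else -1 if x == ")" else 0 for x in input_list]
--     depths = []
--     d = 0
--     for dl in deltas:
--         d += dl
--         depths.append(d)
--     # Phase 2: every digit element must equal the depth at its position.
--     for x, dd in zip(input_list, depths):
--         if x.isdigit() and int(x) != dd:
--             return False
--     return True
-- ===== Notes on version B (the rewrite author's own statement) =====
-- stated objective: alternative
-- what changed: A fuses counting, checking and a status string into one early-breaking loop; B first builds a depth table (inclusive prefix sums of per-element parenthesis deltas) and then a separate query pass checks each digit element against the table, with no status string.
import Mathlib
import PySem

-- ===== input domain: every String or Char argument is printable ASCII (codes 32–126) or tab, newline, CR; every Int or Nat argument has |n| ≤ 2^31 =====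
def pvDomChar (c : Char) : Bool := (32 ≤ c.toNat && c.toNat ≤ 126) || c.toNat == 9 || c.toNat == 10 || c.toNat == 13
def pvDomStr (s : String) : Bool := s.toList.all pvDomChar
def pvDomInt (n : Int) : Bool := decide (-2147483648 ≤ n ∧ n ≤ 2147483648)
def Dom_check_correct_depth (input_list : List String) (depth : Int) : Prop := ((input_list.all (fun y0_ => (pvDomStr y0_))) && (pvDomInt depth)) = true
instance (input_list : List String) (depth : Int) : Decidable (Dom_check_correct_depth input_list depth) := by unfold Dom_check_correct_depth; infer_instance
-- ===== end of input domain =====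

-- B replaces A's fused scan-with-status-string by a two-phase "build depth table, then check digits" pass; objective: alternative decomposition (same linear cost).


-- ===== PORT A =====
-- A's two count-updating ifs, factored as a helper (same two branches, same order):
def pvStep (i : String) (c : Int) : Int :=
  let c := if i == "(" then c + 1 else c
  if i == ")" then c - 1 else c

-- A's loop: count tracks nesting, status accumulates "True"/"False", break on first mismatch.
-- int(i) is ported as (PySem.Int.ofStr? i).getD 0; the .getD 0 is unreachable under the ASCII
-- domain because it sits under the isdigit guard (ASCII digit strings always parse as int).
def pvLoopA : Int → List Char → List String → List Char
  | _, status, [] => status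
  | count, status, i :: rest =>
    let count := pvStep i count
    if PySem.Str.strIsdigit i then
      if count == (PySem.Int.ofStr? i).getD 0 then
        pvLoopA count (status ++ "True".toList) rest
      else
        status ++ "False".toList            -- break
    else
      pvLoopA count status rest

def check_correct_depth (input_list : List String) (_depth : Int) : Bool :=
  let status := pvLoopA 0 [] input_list
  if PySem.Chars.isIn "False".toList status then false else true

-- ===== PORT B =====
def check_correct_depth_alt (input_list : List String) (_depth : Int) : Bool :=
  let deltas := input_list.map (fun x => if x == "(" then (1 : Int) else if x == ")" then (-1 : Int) else 0)
  let depths := (deltas.foldl (fun (acc : List Int × Int) dl => (acc.1 ++ [acc.2 + dl], acc.2 + dl)) ([], 0)).1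
  (input_list.zip depths).all (fun p => !(PySem.Str.strIsdigit p.1 && !((PySem.Int.ofStr? p.1).getD 0 == p.2)))

-- ===== PRECONDITION & SPEC =====
def Spec_check_correct_depth (input_list : List String) (depth : Int) (out : Bool) : Prop := out = check_correct_depth_alt input_list depth
instance (input_list : List String) (depth : Int) (out : Bool) : Decidable (Spec_check_correct_depth input_list depth out) := by unfold Spec_check_correct_depth; infer_instance

-- ===== CLAIM (what is proved, stated in full; the proofs are below) =====
def Claim_equal_check_correct_depth : Prop := ∀ (input_list : List String) (depth : Int), Dom_check_correct_depth input_list depth → Spec_check_correct_depth input_list depth (check_correct_depth input_list depth)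

-- ===== LEMMAS AND PROOFS =====

-- Common abstract reading of both programs: walk the list keeping the running depth,
-- false as soon as a digit element differs from the depth at its position.
def pvGo : List String → Int → Bool
  | [], _ => true
  | i :: rest, c =>
    if PySem.Str.strIsdigit i then
      if pvStep i c == (PySem.Int.ofStr? i).getD 0 then pvGo rest (pvStep i c) else false
    else pvGo rest (pvStep i c)

-- status only grows by appending: pull the initial status out front
theorem pvLoopA_append (xs : List String) : ∀ (c : Int) (s : List Char),
    pvLoopA c s xs = s ++ pvLoopA c [] xs := by
  induction xs with
  | nil => intro c s; simp [pvLoopA]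
  | cons i rest ih =>
    intro c s
    simp only [pvLoopA]
    by_cases hd : PySem.Str.strIsdigit i = true
    · by_cases he : (pvStep i c == (PySem.Int.ofStr? i).getD 0) = true
      · simp only [hd, he, if_true]
        rw [ih, ih (pvStep i c) ([] ++ "True".toList)]
        simp
      · simp only [hd, he, if_true, if_false]
        simp
    · simp only [hd, if_false]
      exact ih _ s

-- "False" starts with 'F'; if 'F' does not occur in the left part, any occurrence lies in the right part
theorem pvIsIn_false_append (a t : List Char) (ha : 'F' ∉ a) :
    PySem.Chars.isIn "False".toList (a ++ t) = PySem.Chars.isIn "False".toList t := by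
  by_cases h : PySem.Chars.isIn "False".toList t = true
  · rw [h, PySem.Chars.isIn_iff_infix]
    exact (PySem.Chars.isIn_iff_infix _ _ |>.mp h).trans (List.suffix_append a t).isInfix
  · have hf : PySem.Chars.isIn "False".toList t = false := Bool.eq_false_iff.mpr h
    rw [hf]
    rw [PySem.Chars.isIn_eq_false_iff] at hf ⊢
    rintro ⟨pre, post, hpp⟩
    rw [List.append_eq_append_iff] at hpp
    rcases hpp with ⟨a', ha', _⟩ | ⟨c', hac, ht⟩
    · -- a = pre ++ "False" ++ a'  →  'F' ∈ a
      exact ha (ha' ▸ List.mem_append.mpr (Or.inl (List.mem_append.mpr (Or.inr (by decide)))))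
    · -- pre ++ "False" = a ++ c'  and  t = c' ++ post
      rw [List.append_eq_append_iff] at hac
      rcases hac with ⟨m, ham, hmc⟩ | ⟨m, _, hcm⟩
      · cases m with
        | nil =>
          simp at hmc
          exact hf ⟨[], post, by rw [ht, ← hmc]; rfl⟩
        | cons ch m' =>
          have hk' : 'F' :: ['a', 'l', 's', 'e'] = ch :: (m' ++ c') := hmc
          injection hk' with h1 _
          exact ha (ham ▸ List.mem_append.mpr (Or.inr (h1 ▸ List.mem_cons_self ..)))
      · exact hf ⟨m, post, by rw [ht, hcm, List.append_assoc]⟩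

theorem pvA_eq_go (xs : List String) : ∀ c : Int,
    (if PySem.Chars.isIn "False".toList (pvLoopA c [] xs) then false else true) = pvGo xs c := by
  induction xs with
  | nil =>
    intro c
    simp only [pvLoopA, pvGo]
    rfl
  | cons i rest ih =>
    intro c
    simp only [pvLoopA, pvGo]
    by_cases hd : PySem.Str.strIsdigit i
    · by_cases he : (pvStep i c == (PySem.Int.ofStr? i).getD 0)
      · simp only [hd, he, if_true]
        rw [pvLoopA_append, List.nil_append, pvIsIn_false_append _ _ (by decide)]
        exact ih _
      · simp only [hd, he, if_true, Bool.false_eq_true, if_false, List.nil_append]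
        rfl
    · simp only [hd, if_false]
      exact ih _
  termination_by xs => xs.length

-- prefix sums of the delta list
def pvPsums : Int → List Int → List Int
  | _, [] => []
  | c, d :: ds => (c + d) :: pvPsums (c + d) ds

theorem pvFoldl_psums (ds : List Int) : ∀ (acc : List Int) (c : Int),
    (ds.foldl (fun (acc : List Int × Int) dl => (acc.1 ++ [acc.2 + dl], acc.2 + dl)) (acc, c)).1
      = acc ++ pvPsums c ds := by
  induction ds with
  | nil => intro acc c; simp [pvPsums]
  | cons d ds ih => intro acc c; simp [pvPsums, ih]

theorem pvStep_eq_add_delta (i : String) (c : Int) :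
    pvStep i c = c + (if i == "(" then (1 : Int) else if i == ")" then (-1 : Int) else 0) := by
  by_cases h1 : (i == "(") = true
  · have hi : i = "(" := eq_of_beq h1
    subst hi; simp [pvStep]
  · by_cases h2 : (i == ")") = true <;> simp [pvStep, h1, h2] <;> ring

theorem pvB_eq_go (xs : List String) : ∀ c : Int,
    ((xs.zip (pvPsums c (xs.map (fun x => if x == "(" then (1 : Int) else if x == ")" then (-1 : Int) else 0)))).all
      (fun p => !(PySem.Str.strIsdigit p.1 && !((PySem.Int.ofStr? p.1).getD 0 == p.2)))) = pvGo xs c := by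
  induction xs with
  | nil => intro c; simp [pvPsums, pvGo]
  | cons i rest ih =>
    intro c
    simp only [List.map_cons, pvPsums, List.zip_cons_cons, List.all_cons, pvGo]
    rw [← pvStep_eq_add_delta]
    by_cases hd : PySem.Str.strIsdigit i = true
    all_goals have hdc := hd
    all_goals rw [PySem.Str.strIsdigit_eq] at hdc
    · by_cases he : (pvStep i c == (PySem.Int.ofStr? i).getD 0)
      · have he' : ((PySem.Int.ofStr? i).getD 0 == pvStep i c) = true := by
          rw [beq_iff_eq] at he ⊢; omega
        simp only [hd, he, he', if_true, Bool.not_false, Bool.and_false, Bool.not_true,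
          Bool.true_and, Bool.not_not, Bool.true_and]
        simpa using ih (pvStep i c)
      · have he' : ((PySem.Int.ofStr? i).getD 0 == pvStep i c) = false := by
          rw [beq_eq_false_iff_ne]; rw [beq_iff_eq] at he; omega
        simp [hd, hdc, he, he']
    · simp only [hd, hdc, Bool.false_and, Bool.not_false, Bool.true_and, if_false]
      exact ih (pvStep i c)

-- ===== VERDICT (by name: the statement is the Claim_ definition above) =====
theorem check_correct_depth_spec : Claim_equal_check_correct_depth := by
  intro xs d _
  unfold Spec_check_correct_depth check_correct_depth check_correct_depth_alt
  dsimp only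
  rw [pvFoldl_psums, List.nil_append, pvB_eq_go]
  exact pvA_eq_go xs 0
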